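-- pv_equiv track=rewrite | github.com/colmeta/devops-agent | env_extractor.py | categorize_env_vars
-- ===== SOURCE A (Python) =====
-- from typing import Dict, List, Optional
--
-- def categorize_env_vars(env_vars: Dict[str, str]) -> Dict[str, Dict[str, str]]:
--     """Categorize environment variables by service"""
--     categories = {
--         'meta': {},
--         'google': {},
--         'microsoft': {},
--         'openai': {},
--         'anthropic': {},
--         'database': {},
--         'flowise': {},
--         'render': {},
--         'other': {}
--     }
--
--     for key, value in env_vars.items():
--         key_lower = key.lower()
--
--         if any(x in key_lower for x in ['meta', 'facebook', 'whatsapp', 'instagram']):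
--             categories['meta'][key] = value
--         elif any(x in key_lower for x in ['google', 'gmail', 'gcal']):
--             categories['google'][key] = value
--         elif any(x in key_lower for x in ['microsoft', 'outlook', 'azure']):
--             categories['microsoft'][key] = value
--         elif 'openai' in key_lower or 'gpt' in key_lower:
--             categories['openai'][key] = value
--         elif 'anthropic' in key_lower or 'claude' in key_lower:
--             categories['anthropic'][key] = value
--         elif any(x in key_lower for x in ['database', 'db', 'postgres', 'mongo']):
--             categories['database'][key] = value
--         elif 'flowise' in key_lower:
--             categories['flowise'][key] = value
--         elif 'render' in key_lower:
--             categories['render'][key] = value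
--         else:
--             categories['other'][key] = value
--
--     # Remove empty categories
--     return {k: v for k, v in categories.items() if v}
-- ===== SOURCE B (Python) =====
-- RULES = [
--     ('meta', ['meta', 'facebook', 'whatsapp', 'instagram']),
--     ('google', ['google', 'gmail', 'gcal']),
--     ('microsoft', ['microsoft', 'outlook', 'azure']),
--     ('openai', ['openai', 'gpt']),
--     ('anthropic', ['anthropic', 'claude']),
--     ('database', ['database', 'db', 'postgres', 'mongo']),
--     ('flowise', ['flowise']),
--     ('render', ['render']),
-- ]
-- CATS = [cat for cat, _ in RULES] + ['other']
--
--
-- def _classify(key):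
--     key_lower = key.lower()
--     for cat, patterns in RULES:
--         if any(p in key_lower for p in patterns):
--             return cat
--     return 'other'
--
--
-- def categorize_env_vars(env_vars):
--     """Categorize environment variables by service (rule-table version)."""
--     result = {}
--     for cat in CATS:
--         bucket = {k: v for k, v in env_vars.items() if _classify(k) == cat}
--         if bucket:
--             result[cat] = bucket
--     return result
-- ===== Notes on version B (the rewrite author's own statement) =====
-- stated objective: simpler
-- what changed: Replaces the nine-way if/elif chain with nine separate accumulator dicts by a data-driven ordered rule table plus a first-match classifier, building each output category with one comprehension per category; the empty-category pruning falls out of the loop instead of a final dict comprehension.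
import Mathlib
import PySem

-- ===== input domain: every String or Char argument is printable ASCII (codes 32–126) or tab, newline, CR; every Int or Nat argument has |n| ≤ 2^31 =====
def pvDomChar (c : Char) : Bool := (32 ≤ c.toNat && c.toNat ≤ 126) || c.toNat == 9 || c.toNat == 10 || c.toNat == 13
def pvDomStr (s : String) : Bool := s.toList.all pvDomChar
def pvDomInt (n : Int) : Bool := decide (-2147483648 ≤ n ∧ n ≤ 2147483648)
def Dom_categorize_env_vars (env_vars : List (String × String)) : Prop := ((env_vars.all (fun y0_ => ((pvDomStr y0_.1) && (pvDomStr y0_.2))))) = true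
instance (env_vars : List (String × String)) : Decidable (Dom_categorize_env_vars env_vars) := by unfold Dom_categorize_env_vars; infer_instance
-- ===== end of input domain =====

-- B replaces A's nine-way if/elif chain over nine accumulator dicts by an ordered rule table with a
-- first-match classifier and one per-category pass; objective: simpler, data-driven structure.


-- ===== PORT A =====
-- loop body of A's for-loop (the if/elif chain); `categories[c][key] = value` is
-- `modify c empty (insert key value)` — exact since key c is always present in categories
def pvStepA (categories : PySem.Dict String (PySem.Dict String String))
    (kv : String × String) : PySem.Dict String (PySem.Dict String String) :=
  let key := kv.1
  let value := kv.2
  let key_lower := PySem.Str.lower key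
  if ["meta", "facebook", "whatsapp", "instagram"].any (fun x => PySem.Str.isIn x key_lower) then
    categories.modify "meta" PySem.Dict.empty (fun d => d.insert key value)
  else if ["google", "gmail", "gcal"].any (fun x => PySem.Str.isIn x key_lower) then
    categories.modify "google" PySem.Dict.empty (fun d => d.insert key value)
  else if ["microsoft", "outlook", "azure"].any (fun x => PySem.Str.isIn x key_lower) then
    categories.modify "microsoft" PySem.Dict.empty (fun d => d.insert key value)
  else if PySem.Str.isIn "openai" key_lower || PySem.Str.isIn "gpt" key_lower then
    categories.modify "openai" PySem.Dict.empty (fun d => d.insert key value)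
  else if PySem.Str.isIn "anthropic" key_lower || PySem.Str.isIn "claude" key_lower then
    categories.modify "anthropic" PySem.Dict.empty (fun d => d.insert key value)
  else if ["database", "db", "postgres", "mongo"].any (fun x => PySem.Str.isIn x key_lower) then
    categories.modify "database" PySem.Dict.empty (fun d => d.insert key value)
  else if PySem.Str.isIn "flowise" key_lower then
    categories.modify "flowise" PySem.Dict.empty (fun d => d.insert key value)
  else if PySem.Str.isIn "render" key_lower then
    categories.modify "render" PySem.Dict.empty (fun d => d.insert key value)
  else
    categories.modify "other" PySem.Dict.empty (fun d => d.insert key value)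

def categorize_env_vars (env_vars : List (String × String)) : List (String × List (String × String)) :=
  let categories : PySem.Dict String (PySem.Dict String String) :=
    PySem.Dict.ofList [("meta", PySem.Dict.empty), ("google", PySem.Dict.empty),
      ("microsoft", PySem.Dict.empty), ("openai", PySem.Dict.empty), ("anthropic", PySem.Dict.empty),
      ("database", PySem.Dict.empty), ("flowise", PySem.Dict.empty), ("render", PySem.Dict.empty),
      ("other", PySem.Dict.empty)]
  let categories := env_vars.foldl pvStepA categories
  -- final dict comprehension `{k: v for k, v in categories.items() if v}`: the keys of
  -- categories are the nine distinct literals, so dict rebuilding is exactly a filter (exact here)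
  (categories.items.filter (fun kv => !kv.2.items.isEmpty)).map (fun kv => (kv.1, kv.2.items))

-- ===== PORT B =====
def pvRules : List (String × List String) :=
  [("meta", ["meta", "facebook", "whatsapp", "instagram"]),
   ("google", ["google", "gmail", "gcal"]),
   ("microsoft", ["microsoft", "outlook", "azure"]),
   ("openai", ["openai", "gpt"]),
   ("anthropic", ["anthropic", "claude"]),
   ("database", ["database", "db", "postgres", "mongo"]),
   ("flowise", ["flowise"]),
   ("render", ["render"])]

def pvCats : List String := pvRules.map (fun r => r.1) ++ ["other"]

-- Source B's _classify: the for-loop with early return is List.find?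
def pvClassify (key : String) : String :=
  let key_lower := PySem.Str.lower key
  match pvRules.find? (fun r => r.2.any (fun p => PySem.Str.isIn p key_lower)) with
  | some r => r.1
  | none => "other"

-- Source B's dict comprehension {k: v for k, v in env_vars.items() if _classify(k) == cat}
def pvBucket (env_vars : List (String × String)) (cat : String) : PySem.Dict String String :=
  env_vars.foldl (fun d kv => if pvClassify kv.1 == cat then d.insert kv.1 kv.2 else d)
    PySem.Dict.empty

def categorize_env_vars_alt (env_vars : List (String × String)) : List (String × List (String × String)) :=
  let result : PySem.Dict String (PySem.Dict String String) :=
    pvCats.foldl (fun result cat =>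
      let bucket := pvBucket env_vars cat
      if bucket.items.isEmpty then result else result.insert cat bucket) PySem.Dict.empty
  result.items.map (fun kv => (kv.1, kv.2.items))

-- ===== PRECONDITION & SPEC =====
def Spec_categorize_env_vars (env_vars : List (String × String)) (out : List (String × List (String × String))) : Prop := out = categorize_env_vars_alt env_vars
instance (env_vars : List (String × String)) (out : List (String × List (String × String))) : Decidable (Spec_categorize_env_vars env_vars out) := by unfold Spec_categorize_env_vars; infer_instance

-- ===== CLAIM (what is proved, stated in full; the proofs are below) =====
def Claim_equal_categorize_env_vars : Prop := ∀ (env_vars : List (String × String)), Dom_categorize_env_vars env_vars → Spec_categorize_env_vars env_vars (categorize_env_vars env_vars)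

-- ===== LEMMAS AND PROOFS =====

-- the classifier always lands in one of the nine canonical categories
theorem pvCats_eq : pvCats = ["meta", "google", "microsoft", "openai", "anthropic",
    "database", "flowise", "render", "other"] := rfl

theorem pvClassify_mem (k : String) : pvClassify k ∈ pvCats := by
  unfold pvClassify
  simp only [pvCats, List.mem_append, List.mem_map, List.mem_singleton]
  split
  · rename_i r h
    exact Or.inl ⟨r, List.mem_of_find?_eq_some h, rfl⟩
  · exact Or.inr rfl

-- A's if/elif chain is: modify at the first matching rule's category
set_option maxHeartbeats 1000000 in
theorem pvStepA_eq (cats : PySem.Dict String (PySem.Dict String String)) (k v : String) :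
    pvStepA cats (k, v) = cats.modify (pvClassify k) PySem.Dict.empty (fun d => d.insert k v) := by
  unfold pvStepA pvClassify pvRules
  simp only [List.find?, List.any_cons, List.any_nil, Bool.or_false]
  split_ifs <;> simp_all only [Bool.not_eq_true]

-- modify at a canonical category on a canonically-shaped dict updates just that component
theorem pvModify_map (c0 : String) (hc : c0 ∈ pvCats) (g : String → PySem.Dict String String)
    (f : PySem.Dict String String → PySem.Dict String String) :
    (PySem.Dict.mk (pvCats.map fun c => (c, g c))).modify c0 PySem.Dict.empty f
      = PySem.Dict.mk (pvCats.map fun c => (c, if c0 == c then f (g c) else g c)) := by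
  rw [pvCats_eq] at hc ⊢
  simp only [List.mem_cons, List.not_mem_nil, or_false] at hc
  rcases hc with rfl | rfl | rfl | rfl | rfl | rfl | rfl | rfl | rfl <;>
    simp [PySem.Dict.modify, PySem.Dict.insert, PySem.Dict.contains, PySem.Dict.getD,
      PySem.Dict.get?, List.find?]

-- A's whole loop, started from a canonically-shaped dict, is nine independent bucket folds
theorem pvLoopA (l : List (String × String)) (g : String → PySem.Dict String String) :
    l.foldl pvStepA (PySem.Dict.mk (pvCats.map fun c => (c, g c)))
      = PySem.Dict.mk (pvCats.map fun c =>
          (c, l.foldl (fun d kv => if pvClassify kv.1 == c then d.insert kv.1 kv.2 else d) (g c))) := by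
  induction l generalizing g with
  | nil => simp
  | cons kv t ih =>
    obtain ⟨k, v⟩ := kv
    rw [List.foldl_cons, pvStepA_eq, pvModify_map (pvClassify k) (pvClassify_mem k) g]
    simp only [List.foldl_cons]
    exact ih (fun c => if pvClassify k == c then (g c).insert k v else g c)

-- B's outer loop over fresh distinct keys is an append of the kept buckets
theorem pvFoldB (B : String → PySem.Dict String String) (cs : List String)
    (d : PySem.Dict String (PySem.Dict String String))
    (hnd : cs.Nodup) (h : ∀ c ∈ cs, d.contains c = false) :
    (cs.foldl (fun r c => if (B c).items.isEmpty then r else r.insert c (B c)) d).items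
      = d.items ++ ((cs.map fun c => (c, B c)).filter fun kv => !kv.2.items.isEmpty) := by
  induction cs generalizing d with
  | nil => simp
  | cons c cs ih =>
    simp only [List.foldl_cons, List.map_cons, List.filter_cons]
    by_cases he : (B c).items.isEmpty
    · rw [if_pos he, ih d hnd.of_cons (fun c' hc' => h c' (List.mem_cons_of_mem _ hc'))]
      simp [he]
    · rw [if_neg he]
      rw [ih (d.insert c (B c)) hnd.of_cons]
      · rw [PySem.Dict.items_insert, h c (List.mem_cons_self ..)]
        simp [he]
      · intro c' hc'
        rw [PySem.Dict.contains_insert]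
        have hne : c' ≠ c := by
          rintro rfl; exact (List.nodup_cons.mp hnd).1 hc'
        simp [hne, h c' (List.mem_cons_of_mem _ hc')]

-- ===== VERDICT (by name: the statement is the Claim_ definition above) =====
theorem categorize_env_vars_spec : Claim_equal_categorize_env_vars := by
  intro env_vars _
  unfold Spec_categorize_env_vars
  have hinit : (PySem.Dict.ofList [("meta", PySem.Dict.empty), ("google", PySem.Dict.empty),
      ("microsoft", PySem.Dict.empty), ("openai", PySem.Dict.empty), ("anthropic", PySem.Dict.empty),
      ("database", PySem.Dict.empty), ("flowise", PySem.Dict.empty), ("render", PySem.Dict.empty),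
      ("other", (PySem.Dict.empty : PySem.Dict String String))])
      = PySem.Dict.mk (pvCats.map fun c => (c, PySem.Dict.empty)) := by decide
  have hA : ((env_vars.foldl pvStepA (PySem.Dict.ofList [("meta", PySem.Dict.empty),
      ("google", PySem.Dict.empty), ("microsoft", PySem.Dict.empty), ("openai", PySem.Dict.empty),
      ("anthropic", PySem.Dict.empty), ("database", PySem.Dict.empty), ("flowise", PySem.Dict.empty),
      ("render", PySem.Dict.empty), ("other", PySem.Dict.empty)])).items.filter
        (fun kv => !kv.2.items.isEmpty)).map (fun kv => (kv.1, kv.2.items))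
      = ((pvCats.map fun c => (c, pvBucket env_vars c)).filter
          (fun kv => !kv.2.items.isEmpty)).map (fun kv => (kv.1, kv.2.items)) := by
    rw [hinit, pvLoopA env_vars (fun _ => PySem.Dict.empty)]
    rfl
  have hB : ((pvCats.foldl (fun result cat =>
        if (pvBucket env_vars cat).items.isEmpty then result
        else result.insert cat (pvBucket env_vars cat)) PySem.Dict.empty).items).map
          (fun kv => (kv.1, kv.2.items))
      = ((pvCats.map fun c => (c, pvBucket env_vars c)).filter
          (fun kv => !kv.2.items.isEmpty)).map (fun kv => (kv.1, kv.2.items)) := by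
    rw [pvFoldB (pvBucket env_vars) pvCats PySem.Dict.empty (by decide)
      (fun c _ => by simp [PySem.Dict.contains_empty])]
    rfl
  exact hA.trans hB.symm
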